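-- pv_equiv track=rewrite | github.com/jredfox/jdk-finder_py | var.py | normpathw
-- ===== SOURCE A (Python) =====
-- def normpathw(v):
--     #Normalize slashes
--     prefix = ''
--     i = -1
--     p = ''
--     prev = ''
--     for c in v:
--         i = i + 1
--         if c == '/':
--             c = '\\'
--         if i > 1 and (prev == '\\' and c == '\\'):
--             continue
--         p = p + c
--         prev = c
--     #Correct malformed prefix of \\??\ instead of \??\
--     if p.startswith('\\\\??\\'):
--        p = p[1:]
--     return p
-- ===== SOURCE B (Python) =====
-- def normpathw(v):
--     # Two-phase rewrite: map '/'->'\', collapse backslash runs via split/join,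
--     # restore the (intentionally kept) leading double backslash, fix '\\??\' prefix.
--     t = v.replace('/', '\\')
--     parts = t.split('\\')
--     if len(parts) == 1:
--         p = t
--     else:
--         p = '\\'.join([parts[0]] + [x for x in parts[1:-1] if x] + [parts[-1]])
--     if len(t) - len(t.lstrip('\\')) >= 2:
--         p = '\\' + p
--     if p.startswith('\\\\??\\'):
--         p = p[1:]
--     return p
-- ===== Notes on version B (the rewrite author's own statement) =====
-- stated objective: faster
-- what changed: Replaces A's stateful indexed character-by-character scan (position counter, previous-character register, continue-based skipping, quadratic p = p + c concatenation) by a declarative pipeline: map slashes, split on backslash, drop the empty middle segments, rejoin with single backslashes, and re-prepend one backslash when the input started with a run of two or more (A keeps positions 0 and 1 unconditionally).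
import Mathlib
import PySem

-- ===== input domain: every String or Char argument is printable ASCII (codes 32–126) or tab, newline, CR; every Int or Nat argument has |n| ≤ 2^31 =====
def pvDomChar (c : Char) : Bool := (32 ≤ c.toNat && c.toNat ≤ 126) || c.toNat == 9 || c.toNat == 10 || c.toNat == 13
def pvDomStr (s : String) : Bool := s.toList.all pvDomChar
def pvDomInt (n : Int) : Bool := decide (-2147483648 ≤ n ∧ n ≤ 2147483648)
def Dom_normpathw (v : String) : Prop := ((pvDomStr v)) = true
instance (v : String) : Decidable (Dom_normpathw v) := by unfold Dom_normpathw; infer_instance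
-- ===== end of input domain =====

-- B replaces A's stateful indexed scan by a split-on-backslash / filter / rejoin pipeline
-- (plus restoring the deliberately-kept leading double backslash); objective: faster (avoids A's quadratic string concatenation; measured faster in a timing run).

-- ===== PORT A =====
-- one iteration of A's for-loop; state = (i, p, prev) with prev the one-char string (or '')
def normpathwStep (st : Int × List Char × List Char) (c : Char) : Int × List Char × List Char :=
  let i := st.1 + 1
  let c := if c = '/' then '\\' else c
  if 1 < i ∧ st.2.2 = ['\\'] ∧ c = '\\' then (i, st.2.1, st.2.2)
  else (i, st.2.1 ++ [c], [c])

def normpathw (v : String) : String :=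
  let r := v.toList.foldl normpathwStep (-1, ([], []))
  let p := r.2.1
  -- p.startswith('\\\\??\\') and p = p[1:]
  let p := if PySem.Chars.startswith p ['\\', '\\', '?', '?', '\\'] then PySem.List.slice p (some 1) none else p
  String.mk p

-- ===== PORT B =====
def normpathw_alt (v : String) : String :=
  -- v.replace('/', '\\'): single-character replace, exact as a map over code points
  let t := v.toList.map (fun c => if c = '/' then '\\' else c)
  -- t.split('\\') with a nonempty separator: exact as List.splitOn
  let parts := t.splitOn '\\'
  -- '\\'.join([parts[0]] + [x for x in parts[1:-1] if x] + [parts[-1]]); parts is never empty,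
  -- so parts[0] / parts[1:-1] / parts[-1] are headI / tail.dropLast / getLastI, and join = intercalate
  let p := if parts.length = 1 then t
    else List.intercalate ['\\'] ([parts.headI] ++ (parts.tail.dropLast.filter (fun x => x ≠ [])) ++ [parts.getLastI])
  -- len(t) - len(t.lstrip('\\')) >= 2 ; lstrip with an explicit char set = dropWhile, exact
  let p := if 2 ≤ (t.length : Int) - ((t.dropWhile (fun c => c = '\\')).length : Int) then '\\' :: p else p
  -- p.startswith('\\\\??\\') and p = p[1:]
  let p := if List.isPrefixOf ['\\', '\\', '?', '?', '\\'] p then p.drop 1 else p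
  String.mk p

-- ===== PRECONDITION & SPEC =====
def Spec_normpathw (v : String) (out : String) : Prop := out = normpathw_alt v
instance (v : String) (out : String) : Decidable (Spec_normpathw v out) := by unfold Spec_normpathw; infer_instance

-- ===== CLAIM (what is proved, stated in full; the proofs are below) =====
def Claim_equal_normpathw : Prop := ∀ (v : String), Dom_normpathw v → Spec_normpathw v (normpathw v)

-- ===== LEMMAS AND PROOFS =====

def sqz : List Char → List Char
  | [] => []
  | [c] => [c]
  | a :: b :: l => if a = '\\' ∧ b = '\\' then sqz (b :: l) else a :: sqz (b :: l)

def ded (prev : List Char) : List Char → List Char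
  | [] => []
  | c :: l => if prev = ['\\'] ∧ c = '\\' then ded prev l else c :: ded [c] l

def fkl : List (List Char) → List (List Char)
  | [] => []
  | [p] => [p]
  | p :: q :: ps => if p = [] then fkl (q :: ps) else p :: fkl (q :: ps)

theorem ic_single (a : List Char) : List.intercalate ['\\'] [a] = a := by
  simp [List.intercalate]

theorem ic_cons (a : List Char) (l : List (List Char)) (h : l ≠ []) :
    List.intercalate ['\\'] (a :: l) = a ++ '\\' :: List.intercalate ['\\'] l := by
  cases l with
  | nil => exact absurd rfl h
  | cons q qs => simp [List.intercalate, List.intersperse]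

theorem sqz_cons_cons (a b : Char) (l : List Char) :
    sqz (a :: b :: l) = if a = '\\' ∧ b = '\\' then sqz (b :: l) else a :: sqz (b :: l) := rfl

theorem sq_ded (l : List Char) : ∀ x, sqz (x :: l) = x :: ded [x] l := by
  induction l with
  | nil => intro x; simp [sqz, ded]
  | cons c l ih =>
    intro x
    rw [sqz_cons_cons]
    by_cases h : x = '\\' ∧ c = '\\'
    · rw [if_pos h, ded, if_pos ⟨by rw [h.1], h.2⟩, ih c, h.1, h.2]
    · have h' : ¬ ([x] = ['\\'] ∧ c = '\\') := fun hh => h ⟨by simpa using hh.1, hh.2⟩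
      rw [if_neg h, ded, if_neg h', ih c]

theorem sq_no_bs (p : List Char) (hp : '\\' ∉ p) : sqz p = p := by
  induction p with
  | nil => rfl
  | cons a l ih =>
    cases l with
    | nil => rfl
    | cons b m =>
      have ha : a ≠ '\\' := fun h => hp (by simp [h])
      rw [sqz_cons_cons, if_neg (fun hh => ha hh.1), ih (fun h => hp (List.mem_cons_of_mem _ h))]

theorem sq_bs_no_bs (p : List Char) (hp : '\\' ∉ p) : sqz ('\\' :: p) = '\\' :: p := by
  cases p with
  | nil => rfl
  | cons c m =>
    have hc : c ≠ '\\' := fun h => hp (by simp [h])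
    rw [sqz_cons_cons, if_neg (fun hh => hc hh.2), sq_no_bs _ hp]

theorem sq_append_bs (p : List Char) (hp : '\\' ∉ p) (r : List Char) :
    sqz (p ++ '\\' :: r) = p ++ sqz ('\\' :: r) := by
  induction p with
  | nil => simp
  | cons a l ih =>
    have ha : a ≠ '\\' := fun h => hp (by simp [h])
    have hl : '\\' ∉ l := fun h => hp (List.mem_cons_of_mem _ h)
    cases l with
    | nil => rw [List.cons_append, List.nil_append, sqz_cons_cons, if_neg (fun hh => ha hh.1)]
             rfl
    | cons b m =>
      rw [List.cons_append, List.cons_append, sqz_cons_cons, if_neg (fun hh => ha hh.1),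
        ← List.cons_append, ih hl]
      simp

theorem fkl_ne_nil (ps : List (List Char)) (h : ps ≠ []) : fkl ps ≠ [] := by
  induction ps with
  | nil => exact absurd rfl h
  | cons p ps ih =>
    cases ps with
    | nil => simp [fkl]
    | cons q qs =>
      rw [fkl]
      split
      · exact ih (by simp)
      · simp

theorem sq_bs_intercalate (ps : List (List Char)) (h : ps ≠ [])
    (hbs : ∀ x ∈ ps, '\\' ∉ x) :
    sqz ('\\' :: List.intercalate ['\\'] ps) = '\\' :: List.intercalate ['\\'] (fkl ps) := by
  induction ps with
  | nil => exact absurd rfl h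
  | cons p ps ih =>
    cases ps with
    | nil =>
      rw [show fkl [p] = [p] from rfl, ic_single]
      exact sq_bs_no_bs p (hbs p (by simp))
    | cons q qs =>
      rw [ic_cons p (q :: qs) (by simp)]
      have hbs' : ∀ x ∈ q :: qs, '\\' ∉ x := fun x hx => hbs x (List.mem_cons_of_mem _ hx)
      have hp : '\\' ∉ p := hbs p (by simp)
      by_cases hpe : p = []
      · subst hpe
        rw [List.nil_append, sqz_cons_cons,
          if_pos (⟨rfl, rfl⟩ : ('\\':Char) = '\\' ∧ ('\\':Char) = '\\'),
          ih (by simp) hbs', show fkl ([] :: q :: qs) = fkl (q :: qs) from by rw [fkl]; simp]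
      · obtain ⟨c, m, rfl⟩ : ∃ c m, p = c :: m := by
          cases p with | nil => exact absurd rfl hpe | cons c m => exact ⟨c, m, rfl⟩
        have hc : c ≠ '\\' := fun h => hp (by simp [h])
        rw [List.cons_append, sqz_cons_cons, if_neg (fun hh => hc hh.2),
          show (c :: (m ++ '\\' :: List.intercalate ['\\'] (q :: qs)))
            = (c :: m) ++ '\\' :: List.intercalate ['\\'] (q :: qs) from by simp,
          sq_append_bs (c :: m) hp (List.intercalate ['\\'] (q :: qs)),
          ih (by simp) hbs',
          show fkl ((c :: m) :: q :: qs) = (c :: m) :: fkl (q :: qs) from by rw [fkl]; simp,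
          ic_cons (c :: m) (fkl (q :: qs)) (fkl_ne_nil _ (by simp))]

theorem splitOn_cons (c : Char) (t : List Char) :
    (c :: t).splitOn '\\' = if c = '\\' then [] :: t.splitOn '\\'
      else (t.splitOn '\\').modifyHead (c :: ·) := by
  simp only [List.splitOn, List.splitOnP_cons]
  by_cases h : c = '\\' <;> simp [h]

theorem splitOn_ne_nil (t : List Char) : t.splitOn '\\' ≠ [] := by
  induction t with
  | nil => simp [List.splitOn]
  | cons c t ih =>
    rw [splitOn_cons]
    split
    · simp
    · cases ht : t.splitOn '\\' with
      | nil => exact absurd ht ih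
      | cons q qs => simp

theorem splitOn_no_bs (t : List Char) : ∀ x ∈ t.splitOn '\\', '\\' ∉ x := by
  induction t with
  | nil => simp [List.splitOn]
  | cons c t ih =>
    rw [splitOn_cons]
    by_cases h : c = '\\'
    · rw [if_pos h]
      intro x hx
      rcases List.mem_cons.mp hx with h1 | h1
      · subst h1; simp
      · exact ih x h1
    · rw [if_neg h]
      cases ht : t.splitOn '\\' with
      | nil => exact absurd ht (splitOn_ne_nil t)
      | cons q qs =>
        rw [List.modifyHead_cons]
        intro x hx
        rcases List.mem_cons.mp hx with h1 | h1
        · subst h1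
          intro hmem
          rcases List.mem_cons.mp hmem with h2 | h2
          · exact h h2.symm
          · exact ih q (ht ▸ List.mem_cons_self ..) h2
        · exact ih x (ht ▸ List.mem_cons_of_mem _ h1)

theorem intercalate_splitOn_eq (t : List Char) :
    List.intercalate ['\\'] (t.splitOn '\\') = t := by
  induction t with
  | nil => simp [List.splitOn, List.intercalate]
  | cons c t ih =>
    rw [splitOn_cons]
    by_cases h : c = '\\'
    · rw [if_pos h, ic_cons [] (t.splitOn '\\') (splitOn_ne_nil t), ih, h, List.nil_append]
    · rw [if_neg h]
      cases ht : t.splitOn '\\' with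
      | nil => exact absurd ht (splitOn_ne_nil t)
      | cons q qs =>
        rw [List.modifyHead_cons]
        cases qs with
        | nil =>
          rw [ic_single] at *
          rw [← ih, ht, ic_single]
        | cons r rs =>
          rw [ht] at ih
          rw [ic_cons (c :: q) (r :: rs) (by simp), ← ih, ic_cons q (r :: rs) (by simp)]
          simp

theorem splitOn_len_one (t : List Char) : (t.splitOn '\\').length = 1 ↔ '\\' ∉ t := by
  induction t with
  | nil => simp [List.splitOn]
  | cons c t ih =>
    rw [splitOn_cons]
    by_cases h : c = '\\'
    · rw [if_pos h]
      cases ht : t.splitOn '\\' with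
      | nil => exact absurd ht (splitOn_ne_nil t)
      | cons q qs => simp [h]
    · rw [if_neg h]
      cases ht : t.splitOn '\\' with
      | nil => exact absurd ht (splitOn_ne_nil t)
      | cons q qs =>
        rw [ht] at ih
        rw [List.modifyHead_cons]
        simp only [List.length_cons] at ih ⊢
        constructor
        · intro hq
          have hnb := ih.mp hq
          simpa [Ne.symm h] using hnb
        · intro hnb
          have := ih.mpr (fun hm => hnb (List.mem_cons_of_mem _ hm))
          omega

theorem fkl_eq_filter (ps : List (List Char)) (h : ps ≠ []) :
    fkl ps = ps.dropLast.filter (fun x => x ≠ []) ++ [ps.getLastI] := by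
  induction ps with
  | nil => exact absurd rfl h
  | cons p ps ih =>
    cases ps with
    | nil => simp [fkl, List.getLastI]
    | cons q qs =>
      have hgl : (p :: q :: qs).getLastI = (q :: qs).getLastI := by
        rw [List.getLastI_eq_getLast?_getD, List.getLastI_eq_getLast?_getD, List.getLast?_cons_cons]
      rw [fkl, hgl, show (p :: q :: qs).dropLast = p :: (q :: qs).dropLast from by simp]
      by_cases hp : p = []
      · rw [if_pos hp, ih (by simp), hp, List.filter_cons]
        simp
      · rw [if_neg hp, ih (by simp), List.filter_cons, if_pos (by simpa using hp)]
        simp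

theorem foldA_char (l : List Char) : ∀ (i : Int), 1 ≤ i → ∀ (p prev : List Char),
    (l.foldl normpathwStep (i, (p, prev))).2.1
      = p ++ ded prev (l.map (fun c => if c = '/' then '\\' else c)) := by
  induction l with
  | nil => intro i hi p prev; simp [ded]
  | cons c l ih =>
    intro i hi p prev
    simp only [List.foldl_cons, List.map_cons, normpathwStep, ded]
    by_cases h : prev = ['\\'] ∧ (if c = '/' then '\\' else c) = '\\'
    · rw [if_pos ⟨by omega, h⟩, if_pos h, ih (i+1) (by omega)]
    · rw [if_neg (fun hh => h hh.2), if_neg h, ih (i+1) (by omega)]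
      simp

def preA (t : List Char) : List Char :=
  match t with
  | [] => []
  | [c] => [c]
  | c0 :: c1 :: r => c0 :: sqz (c1 :: r)

theorem A_loop_eq (v : String) :
    (v.toList.foldl normpathwStep (-1, ([], []))).2.1
      = preA (v.toList.map (fun c => if c = '/' then '\\' else c)) := by
  cases hv : v.toList with
  | nil => simp [preA]
  | cons c0 l =>
    cases l with
    | nil =>
      show (normpathwStep (-1, ([], [])) c0).2.1 = _
      simp only [normpathwStep, preA, List.map_cons, List.map_nil]
      norm_num
    | cons c1 r =>
      have h0 : normpathwStep (-1, ([], [])) c0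
          = (0, ([if c0 = '/' then '\\' else c0], [if c0 = '/' then '\\' else c0])) := by
        simp only [normpathwStep]
        norm_num
      have h1 : normpathwStep (0, ([if c0 = '/' then '\\' else c0], [if c0 = '/' then '\\' else c0])) c1
          = (1, ([if c0 = '/' then '\\' else c0, if c1 = '/' then '\\' else c1],
                 [if c1 = '/' then '\\' else c1])) := by
        simp only [normpathwStep]
        norm_num
      simp only [List.foldl_cons, h0, h1]
      rw [foldA_char r 1 (by norm_num)]
      simp only [preA, List.map_cons]
      rw [sq_ded]
      simp

def preB (t : List Char) : List Char :=
  if (t.splitOn '\\').length = 1 then t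
  else List.intercalate ['\\'] ([(t.splitOn '\\').headI]
    ++ ((t.splitOn '\\').tail.dropLast.filter (fun x => x ≠ [])) ++ [(t.splitOn '\\').getLastI])

theorem preB_eq_sq (t : List Char) : preB t = sqz t := by
  unfold preB
  cases ht : t.splitOn '\\' with
  | nil => exact absurd ht (splitOn_ne_nil t)
  | cons p0 ps =>
    cases ps with
    | nil =>
      have hlen : (t.splitOn '\\').length = 1 := by rw [ht]; rfl
      split_ifs with hc
      · exact (sq_no_bs t ((splitOn_len_one t).mp hlen)).symm
      · simp at hc
    | cons q qs =>
      split_ifs with hc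
      · simp at hc
      have hbs := splitOn_no_bs t
      rw [ht] at hbs
      have hp0 : '\\' ∉ p0 := hbs p0 (by simp)
      have htail : ∀ x ∈ q :: qs, '\\' ∉ x := fun x hx => hbs x (List.mem_cons_of_mem _ hx)
      have hT : t = p0 ++ '\\' :: List.intercalate ['\\'] (q :: qs) := by
        rw [← intercalate_splitOn_eq t, ht, ic_cons p0 (q :: qs) (by simp)]
      have hsq : sqz t = p0 ++ '\\' :: List.intercalate ['\\'] (fkl (q :: qs)) := by
        conv_lhs => rw [hT]
        rw [sq_append_bs p0 hp0, sq_bs_intercalate (q :: qs) (by simp) htail]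
      rw [hsq]
      have hmid : (p0 :: q :: qs).tail.dropLast.filter (fun x => x ≠ []) ++ [(p0 :: q :: qs).getLastI]
          = fkl (q :: qs) := by
        have hg : (p0 :: q :: qs).getLastI = (q :: qs).getLastI := by
          rw [List.getLastI_eq_getLast?_getD, List.getLastI_eq_getLast?_getD, List.getLast?_cons_cons]
        rw [List.tail_cons, hg, ← fkl_eq_filter (q :: qs) (by simp)]
      rw [show ([(p0 :: q :: qs).headI] ++ ((p0 :: q :: qs).tail.dropLast.filter (fun x => x ≠ [])) ++ [(p0 :: q :: qs).getLastI])
            = (p0 :: q :: qs).headI :: (((p0 :: q :: qs).tail.dropLast.filter (fun x => x ≠ [])) ++ [(p0 :: q :: qs).getLastI]) from by simp,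
        hmid, List.headI,
        ic_cons p0 (fkl (q :: qs)) (fkl_ne_nil _ (by simp))]

theorem lead_run_iff (t : List Char) :
    (2 ≤ (t.length : Int) - ((t.dropWhile (fun c => c = '\\')).length : Int))
      ↔ (∃ r, t = '\\' :: '\\' :: r) := by
  cases t with
  | nil => simp
  | cons c0 l =>
    cases l with
    | nil =>
      by_cases h : c0 = '\\'
      · rw [List.dropWhile_cons, if_pos (by simp [h])]
        simp
      · rw [List.dropWhile_cons, if_neg (by simp [h])]
        constructor
        · intro hh; simp at hh
        · rintro ⟨r', hr⟩; injection hr with h2 _; exact absurd h2 h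
    | cons c1 r =>
      by_cases h0 : c0 = '\\'
      · by_cases h1 : c1 = '\\'
        · subst h0; subst h1
          rw [List.dropWhile_cons, if_pos (by simp), List.dropWhile_cons, if_pos (by simp)]
          have hle := List.length_dropWhile_le (fun c => decide (c = '\\')) r
          constructor
          · intro _; exact ⟨r, rfl⟩
          · intro _
            simp only [List.length_cons]
            push_cast
            omega
        · subst h0
          rw [List.dropWhile_cons, if_pos (by simp), List.dropWhile_cons, if_neg (by simp [h1])]
          constructor
          · intro hh
            simp only [List.length_cons] at hh
            push_cast at hh
            omega
          · rintro ⟨r', hr⟩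
            injection hr with _ h2
            injection h2 with h2 _
            exact absurd h2 h1
      · rw [List.dropWhile_cons, if_neg (by simp [h0])]
        constructor
        · intro hh
          simp only [List.length_cons] at hh
          push_cast at hh
          omega
        · rintro ⟨r', hr⟩
          injection hr with h2 _
          exact absurd h2 h0

theorem preA_eq (t : List Char) :
    preA t = if 2 ≤ (t.length : Int) - ((t.dropWhile (fun c => c = '\\')).length : Int)
      then '\\' :: sqz t else sqz t := by
  cases t with
  | nil => rw [if_neg (by simp [List.dropWhile])]; rfl
  | cons c0 l =>
    cases l with
    | nil =>
      rw [if_neg (fun hh => by obtain ⟨r, hr⟩ := (lead_run_iff _).mp hh; simp at hr)]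
      rfl
    | cons c1 r =>
      by_cases hd : c0 = '\\' ∧ c1 = '\\'
      · obtain ⟨h0, h1⟩ := hd
        subst h0; subst h1
        rw [if_pos ((lead_run_iff _).mpr ⟨r, rfl⟩)]
        show '\\' :: sqz ('\\' :: r) = _
        rw [sqz_cons_cons, if_pos ⟨rfl, rfl⟩]
      · rw [if_neg (fun hh => by
          obtain ⟨r', hr⟩ := (lead_run_iff _).mp hh
          injection hr with ha hb
          injection hb with hb _
          exact hd ⟨ha, hb⟩)]
        show c0 :: sqz (c1 :: r) = sqz (c0 :: c1 :: r)
        rw [sqz_cons_cons, if_neg hd]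

theorem slice_one_drop (p : List Char) : PySem.List.slice p (some 1) none = p.drop 1 := by
  cases p with
  | nil => rfl
  | cons c l =>
    simp [PySem.List.slice, PySem.List.clampIdx]

theorem preB_body_eq (t : List Char) :
    (if (t.splitOn '\\').length = 1 then t
     else List.intercalate ['\\'] ([(t.splitOn '\\').headI]
       ++ ((t.splitOn '\\').tail.dropLast.filter (fun x => x ≠ [])) ++ [(t.splitOn '\\').getLastI]))
      = sqz t := preB_eq_sq t

-- ===== VERDICT (by name: the statement is the Claim_ definition above) =====
theorem normpathw_spec : Claim_equal_normpathw := by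
  intro v _
  show normpathw v = normpathw_alt v
  simp only [normpathw, normpathw_alt]
  rw [A_loop_eq v, preA_eq, preB_body_eq]
  rw [slice_one_drop]
  rfl
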